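-- pv_equiv track=rewrite | github.com/jacklee9437/beakjoon | array.8958.oxquiz.py | sum_of
-- ===== SOURCE A (Python) =====
-- def sum_of(a):
--     sum = 0
--     cnt = 0
--     for i in range(len(a)):
--         if (a[i] == "O"):
--             cnt += 1
--             sum += cnt
--         else:
--             cnt = 0
--     return sum
-- ===== SOURCE B (Python) =====
-- def sum_of(a):
--     total = 0
--     i = 0
--     n = len(a)
--     while i < n:
--         if a[i] == "O":
--             j = i + 1
--             while j < n and a[j] == "O":
--                 j += 1
--             k = j - i
--             total += k * (k + 1) // 2
--             i = j
--         else: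
--             i += 1
--     return total
-- ===== Notes on version B (the rewrite author's own statement) =====
-- stated objective: alternative
-- what changed: Replaces the per-character running counter/accumulator with a two-pointer scan that finds each maximal run of consecutive "O" and adds its triangular number k*(k+1)//2 in closed form.
import Mathlib
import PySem

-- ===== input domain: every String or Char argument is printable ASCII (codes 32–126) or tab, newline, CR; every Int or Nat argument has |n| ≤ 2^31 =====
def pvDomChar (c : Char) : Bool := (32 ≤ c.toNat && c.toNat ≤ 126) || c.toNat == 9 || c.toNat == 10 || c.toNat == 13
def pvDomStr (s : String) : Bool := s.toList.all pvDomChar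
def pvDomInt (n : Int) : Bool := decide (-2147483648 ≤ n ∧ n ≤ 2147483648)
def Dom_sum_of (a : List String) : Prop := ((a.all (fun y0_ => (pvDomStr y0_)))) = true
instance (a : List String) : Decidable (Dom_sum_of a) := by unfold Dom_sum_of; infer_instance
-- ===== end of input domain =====

-- B changes the algorithm (two-pointer maximal-run scan + closed-form triangular sums); same return value.

-- ===== PORT A =====
-- for i in range(len(a)): if a[i] == "O": cnt += 1; sum += cnt else: cnt = 0; return sum
def sum_of (a : List String) : Int :=
  ((PySem.List.pyRange 0 (PySem.List.len a) 1).foldl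
    (fun (s : Int × Int) i =>
      if PySem.List.pyGetD a i "" = "O" then (s.1 + (s.2 + 1), s.2 + 1) else (s.1, 0))
    (0, 0)).1

-- ===== PORT B =====
-- inner while of B: counts how many further consecutive "O" follow, returns (count, rest)
def pvSplitRun : List String → Nat × List String
  | [] => (0, [])
  | x :: xs => if x = "O" then ((pvSplitRun xs).1 + 1, (pvSplitRun xs).2) else (0, x :: xs)

theorem pvSplitRun_len : ∀ (xs : List String), (pvSplitRun xs).2.length ≤ xs.length := by
  intro xs
  induction xs with
  | nil => simp [pvSplitRun]
  | cons x xs ih =>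
    simp only [pvSplitRun]
    split
    · exact Nat.le_succ_of_le ih
    · simp

-- outer while of B: per maximal run of k consecutive "O", add k*(k+1)//2
def pvRuns : List String → Int
  | [] => 0
  | x :: xs =>
    if x = "O" then
      let k := (pvSplitRun xs).1 + 1
      (↑(k * (k + 1) / 2) : Int) + pvRuns (pvSplitRun xs).2
    else pvRuns xs
termination_by l => l.length
decreasing_by
  · exact Nat.lt_succ_of_le (pvSplitRun_len xs)
  · simp

def sum_of_alt (a : List String) : Int := pvRuns a

-- ===== PRECONDITION & SPEC =====
def Spec_sum_of (a : List String) (out : Int) : Prop := out = sum_of_alt a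
instance (a : List String) (out : Int) : Decidable (Spec_sum_of a out) := by unfold Spec_sum_of; infer_instance

-- ===== CLAIM (what is proved, stated in full; the proofs are below) =====
def Claim_equal_sum_of : Prop := ∀ (a : List String), Dom_sum_of a → Spec_sum_of a (sum_of a)

-- ===== LEMMAS AND PROOFS =====

-- A's loop contribution, counter as a Nat
def pvF (c : Nat) : List String → Nat
  | [] => 0
  | x :: xs => if x = "O" then (c + 1) + pvF (c + 1) xs else pvF 0 xs

theorem pvFold_eq_F : ∀ (l : List String) (s : Int) (n : Nat),
    (l.foldl (fun (s : Int × Int) x => if x = "O" then (s.1 + (s.2 + 1), s.2 + 1) else (s.1, 0))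
      (s, (n : Int))).1 = s + (pvF n l : Int) := by
  intro l
  induction l with
  | nil => intro s n; simp [pvF]
  | cons x xs ih =>
    intro s n
    rw [List.foldl_cons]
    by_cases hx : x = "O"
    · show (xs.foldl _ (if x = "O" then (s + ((n : Int) + 1), (n : Int) + 1) else (s, 0))).1 = _
      rw [if_pos hx]
      have h1 : ((n : Int) + 1) = ((n + 1 : Nat) : Int) := by push_cast; ring
      rw [h1, ih (s + ((n + 1 : Nat) : Int)) (n + 1)]
      simp only [pvF, hx]
      push_cast
      ring
    · show (xs.foldl _ (if x = "O" then (s + ((n : Int) + 1), (n : Int) + 1) else (s, 0))).1 = _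
      rw [if_neg hx]
      have := ih s 0
      simp only [Nat.cast_zero] at this
      rw [this]
      simp [pvF, hx]

theorem pvTri_succ (k : Nat) : (k + 1) * (k + 1 + 1) / 2 = k * (k + 1) / 2 + (k + 1) := by
  rw [show (k + 1) * (k + 1 + 1) = k * (k + 1) + (k + 1) * 2 by ring,
    Nat.add_mul_div_right _ _ two_pos]

-- run decomposition of pvF
theorem pvF_splitRun : ∀ (xs : List String) (c : Nat),
    (pvF c xs : Int) = (c * (pvSplitRun xs).1 : Nat)
      + ((pvSplitRun xs).1 * ((pvSplitRun xs).1 + 1) / 2 : Nat)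
      + (pvF 0 (pvSplitRun xs).2 : Int) := by
  intro xs
  induction xs with
  | nil => intro c; simp [pvF, pvSplitRun]
  | cons x xs ih =>
    intro c
    by_cases hx : x = "O"
    · simp only [pvF, pvSplitRun, hx, if_true]
      rw [Nat.cast_add, ih (c + 1), pvTri_succ]
      push_cast
      ring
    · simp [pvF, pvSplitRun, hx]

theorem pvF_eq_runs : ∀ (xs : List String), (pvF 0 xs : Int) = pvRuns xs := by
  intro xs
  induction hn : xs.length using Nat.strong_induction_on generalizing xs with
  | _ n ih =>
    match xs, hn with
    | [], _ => simp [pvF, pvRuns]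
    | x :: xs, hn =>
      by_cases hx : x = "O"
      · simp only [pvF, pvRuns, hx, if_true]
        have hrec : (pvF 0 (pvSplitRun xs).2 : Int) = pvRuns (pvSplitRun xs).2 := by
          have hlt : (pvSplitRun xs).2.length < n := by
            have := pvSplitRun_len xs
            simp only [List.length_cons] at hn
            omega
          exact ih _ hlt _ rfl
        rw [show (0 + 1 : Nat) = 1 from rfl, Nat.cast_add, pvF_splitRun xs 1, hrec, pvTri_succ]
        push_cast
        ring
      · simp only [pvF, pvRuns, hx, if_false]
        have : xs.length < n := by simp only [List.length_cons] at hn; omega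
        exact ih xs.length this xs rfl

-- ===== VERDICT (by name: the statement is the Claim_ definition above) =====
theorem sum_of_spec : Claim_equal_sum_of := by
  intro a _
  show sum_of a = sum_of_alt a
  unfold sum_of sum_of_alt
  rw [show (PySem.List.len a) = (a.length : Int) from rfl,
    PySem.List.foldl_pyRange_zero_pyGetD' a ""
      (fun (s : Int × Int) x => if x = "O" then (s.1 + (s.2 + 1), s.2 + 1) else (s.1, 0)) (0, 0)]
  have := pvFold_eq_F a 0 0
  simp only [Nat.cast_zero] at this
  rw [this, pvF_eq_runs]
  simp
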